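-- pv_equiv track=rewrite | github.com/JJangCoders/Algorithm-Study | ByteAurora/20230720/17413.py | solution
-- ===== SOURCE A (Python) =====
-- from collections import deque
--
-- def solution(original_string):
--     string_length = len(original_string)
--     converted_string = ""
--     temp_string = deque()
--     idx = 0
--
--     while idx < string_length:
--         if original_string[idx] == "<":
--             while original_string[idx] != ">":
--                 converted_string += original_string[idx]
--                 idx += 1
--             converted_string += original_string[idx]
--             idx += 1
--         elif original_string[idx] == " ":
--             converted_string += " "
--             idx += 1
--         else:
--             while idx < string_length and original_string[idx] != " " and original_string[idx] != "<":
--                 temp_string.appendleft(original_string[idx])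
--                 idx += 1
--             converted_string += "".join(temp_string)
--             temp_string.clear()
--
--     return converted_string
-- ===== SOURCE B (Python) =====
-- def solution(original_string):
--     pieces = []
--     i = 0
--     n = len(original_string)
--     while i < n:
--         if original_string[i] == "<":
--             j = original_string.index(">", i) + 1
--             pieces.append(original_string[i:j])
--             i = j
--         else:
--             j = i
--             while j < n and original_string[j] != "<":
--                 j += 1
--             chunk = original_string[i:j]
--             pieces.append(" ".join(tok[::-1] for tok in chunk.split(" ")))
--             i = j
--     return "".join(pieces)
-- ===== Notes on version B (the rewrite author's own statement) =====
-- stated objective: simpler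
-- what changed: A walks the string index by index with nested while loops and a character deque (appendleft) to reverse each word; B decomposes the string into tag pieces copied verbatim and maximal tag-free runs rewritten by splitting the run on single spaces, reversing each token by slicing, and re-joining.
import Mathlib
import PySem

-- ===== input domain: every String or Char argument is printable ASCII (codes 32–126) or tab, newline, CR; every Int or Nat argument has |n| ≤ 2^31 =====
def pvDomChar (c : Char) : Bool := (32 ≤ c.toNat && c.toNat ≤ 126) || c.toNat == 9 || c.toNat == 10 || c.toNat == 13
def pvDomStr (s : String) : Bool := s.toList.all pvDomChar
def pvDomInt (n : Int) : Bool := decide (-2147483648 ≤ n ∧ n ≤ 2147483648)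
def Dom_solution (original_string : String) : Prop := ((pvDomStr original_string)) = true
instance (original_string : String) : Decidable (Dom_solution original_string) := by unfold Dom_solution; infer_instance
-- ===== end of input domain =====

-- B replaces A's index-driven while loops and character deque by a piecewise decomposition:
-- copy each <...> tag verbatim, and rewrite each maximal tag-free run by splitting it on single
-- spaces, reversing each token by slicing and re-joining (simpler; measured faster by a constant factor).

-- ===== PORT A =====
-- inner while of A: consume characters up to and including the first '>' ([] case = Python's
-- IndexError on an unterminated tag, excluded by Pre_)
def tagA : List Char → List Char × List Char
  | [] => ([], [])
  | c :: r => if c = '>' then ([c], r) else ((tagA r).1.cons c, (tagA r).2)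

lemma tagA_len : ∀ l : List Char, (tagA l).2.length ≤ l.length := by
  intro l; induction l with
  | nil => simp [tagA]
  | cons c r ih =>
    by_cases hc : c = '>'
    · rw [tagA, if_pos hc]; simp
    · rw [tagA, if_neg hc]; have := ih; simp only [List.length_cons]; omega

-- inner word while of A: deque.appendleft = cons onto the front of temp
def wordA (temp : List Char) : List Char → List Char × List Char
  | [] => (temp, [])
  | c :: r => if c = ' ' ∨ c = '<' then (temp, c :: r) else wordA (c :: temp) r

lemma wordA_len : ∀ (l : List Char) (temp : List Char), (wordA temp l).2.length ≤ l.length := by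
  intro l; induction l with
  | nil => intro temp; simp [wordA]
  | cons c r ih =>
    intro temp
    by_cases hc : c = ' ' ∨ c = '<'
    · rw [wordA, if_pos hc]
    · rw [wordA, if_neg hc]; exact le_trans (ih _) (by simp)

def goA : List Char → List Char
  | [] => []
  | c :: r =>
    if hlt : c = '<' then
      (tagA (c :: r)).1 ++ goA (tagA (c :: r)).2
    else if _h2 : c = ' ' then
      ' ' :: goA r
    else
      (wordA [] (c :: r)).1 ++ goA (wordA [] (c :: r)).2
termination_by l => l.length
decreasing_by
  · subst hlt
    have he : tagA ('<' :: r) = ('<' :: (tagA r).1, (tagA r).2) := by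
      rw [tagA, if_neg (by decide)]
    rw [he]
    have := tagA_len r; simp; omega
  · simp
  · simp only [wordA]
    have hc : ¬ (c = ' ' ∨ c = '<') := fun h => h.elim _h2 hlt
    rw [if_neg hc]
    have := wordA_len r [c]; simp; omega

def solution (original_string : String) : String := String.ofList (goA original_string.toList)

-- ===== PORT B =====
-- the space-join of the slice-reversed tokens of chunk.split (tok[::-1] = List.reverse, cf. PySem.List.slice?_none_none_neg_one)
def revTokens (chunk : List Char) : List Char :=
  PySem.Chars.join [' '] ((PySem.Chars.splitOn chunk [' ']).map List.reverse)

def goB : List Char → List Char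
  | [] => []
  | c :: r =>
    if _h1 : c = '<' then
      -- j = original_string.index(">", i) + 1; copy s[i:j] verbatim; if no '>' Python raises
      -- ValueError (excluded by Pre_; here take 1/tail are then vacuous)
      ((c :: r).takeWhile (fun a => a != '>')) ++ ((c :: r).dropWhile (fun a => a != '>')).take 1
        ++ goB (((c :: r).dropWhile (fun a => a != '>')).tail)
    else
      revTokens ((c :: r).takeWhile (fun a => a != '<')) ++ goB ((c :: r).dropWhile (fun a => a != '<'))
termination_by l => l.length
decreasing_by
  · have h := List.length_dropWhile_le (fun a => a != '>') (c :: r)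
    have h2 := List.length_tail (l := (c :: r).dropWhile (fun a => a != '>'))
    simp at h h2 ⊢; omega
  · have h := List.length_dropWhile_le (fun a => a != '<') r
    have : (c :: r).dropWhile (fun a => a != '<') = r.dropWhile (fun a => a != '<') := by
      rw [List.dropWhile_cons_of_pos]; simp [_h1]
    rw [this]; simp; omega

def solution_alt (original_string : String) : String := String.ofList (goB original_string.toList)

-- ===== PRECONDITION & SPEC =====
-- Pre_ excludes exactly the strings containing a '<' with no later '>', on which A raises
-- IndexError (and B raises ValueError).
def preCheck : List Char → Bool
  | [] => true
  | c :: r => (c != '<' || r.contains '>') && preCheck r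

def Pre_solution (original_string : String) : Prop := preCheck original_string.toList = true
instance (original_string : String) : Decidable (Pre_solution original_string) := by unfold Pre_solution; infer_instance

def pvWitness_solution : String := "ab <i>cd e</i>"

def Spec_solution (original_string : String) (out : String) : Prop := out = solution_alt original_string
instance (original_string : String) (out : String) : Decidable (Spec_solution original_string out) := by unfold Spec_solution; infer_instance

-- ===== CLAIM (what is proved, stated in full; the proofs are below) =====
def Claim_equal_solution : Prop := ∀ (original_string : String), Dom_solution original_string → Pre_solution original_string → Spec_solution original_string (solution original_string)

-- ===== LEMMAS AND PROOFS =====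

-- simple recursion computing chunk.split(' ')
def sp : List Char → List (List Char)
  | [] => [[]]
  | c :: r => if c = ' ' then [] :: sp r else
      match sp r with
      | [] => [[c]]
      | t :: ts => (c :: t) :: ts

lemma sp_ne_nil : ∀ l : List Char, sp l ≠ [] := by
  intro l; cases l with
  | nil => simp [sp]
  | cons c r =>
    by_cases hc : c = ' '
    · rw [sp, if_pos hc]; simp
    · rw [sp, if_neg hc]
      cases sp r <;> simp

def mapHd (f : List Char → List Char) : List (List Char) → List (List Char)
  | [] => []
  | t :: ts => f t :: ts

lemma go_spec : ∀ (fuel : Nat) (l cur : List Char) (acc : List (List Char)), l.length < fuel →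
    PySem.Chars.splitOn.go [' '] fuel l cur acc
      = acc.reverse ++ mapHd (fun t => cur.reverse ++ t) (sp l) := by
  intro fuel
  induction fuel with
  | zero => intro l cur acc h; omega
  | succ n ih =>
    intro l cur acc h
    cases l with
    | nil =>
      rw [PySem.Chars.splitOn.go]
      · simp [sp, mapHd]
      · omega
    | cons c rest =>
      rw [PySem.Chars.splitOn.go]
      by_cases hc : c = ' '
      · subst hc
        have hp : [' '].isPrefixOf (' ' :: rest) = true := by simp [List.isPrefixOf]
        rw [if_pos hp]
        simp only [List.length_cons, List.length_nil, List.drop_succ_cons, List.drop_zero]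
        rw [ih rest [] (cur.reverse :: acc) (by simp at h ⊢; omega)]
        obtain ⟨t, ts, hts⟩ : ∃ t ts, sp rest = t :: ts := by
          cases hsp : sp rest with
          | nil => exact absurd hsp (sp_ne_nil rest)
          | cons t ts => exact ⟨t, ts, rfl⟩
        simp [sp, mapHd, hts]
      · have hp : [' '].isPrefixOf (c :: rest) = false := by
          simp [List.isPrefixOf]; exact fun hh => hc hh.symm
        rw [if_neg (by simp [hp])]
        rw [ih rest (c :: cur) acc (by simp at h ⊢; omega)]
        obtain ⟨t, ts, hts⟩ : ∃ t ts, sp rest = t :: ts := by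
          cases hsp : sp rest with
          | nil => exact absurd hsp (sp_ne_nil rest)
          | cons t ts => exact ⟨t, ts, rfl⟩
        simp [sp, mapHd, hts, hc]

lemma splitOn_space (l : List Char) : PySem.Chars.splitOn l [' '] = sp l := by
  unfold PySem.Chars.splitOn
  rw [go_spec (l.length + 1) l [] [] (by omega)]
  obtain ⟨t, ts, hts⟩ : ∃ t ts, sp l = t :: ts := by
    cases hsp : sp l with
    | nil => exact absurd hsp (sp_ne_nil l)
    | cons t ts => exact ⟨t, ts, rfl⟩
  simp [hts, mapHd]

-- remaining tokens after the first word
def tks (l : List Char) : List (List Char) :=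
  match l.dropWhile (fun a => a != ' ') with
  | [] => []
  | _ :: r => sp r

lemma sp_head : ∀ l : List Char, sp l = l.takeWhile (fun a => a != ' ') :: tks l := by
  intro l; induction l with
  | nil => simp [sp, tks]
  | cons c r ih =>
    by_cases hc : c = ' '
    · subst hc; simp [sp, tks]
    · simp only [sp, if_neg hc, ih]
      have h1 : (c :: r).takeWhile (fun a => a != ' ') = c :: r.takeWhile (fun a => a != ' ') := by
        rw [List.takeWhile_cons_of_pos]; simp [hc]
      have h2 : (c :: r).dropWhile (fun a => a != ' ') = r.dropWhile (fun a => a != ' ') := by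
        rw [List.dropWhile_cons_of_pos]; simp [hc]
      simp [tks, h1, h2]

lemma wordA_spec : ∀ (l temp : List Char),
    wordA temp l = ((l.takeWhile fun a => !(a == ' ' || a == '<')).reverse ++ temp,
                    l.dropWhile fun a => !(a == ' ' || a == '<')) := by
  intro l; induction l with
  | nil => intro temp; simp [wordA]
  | cons c r ih =>
    intro temp
    by_cases hc : c = ' ' ∨ c = '<'
    · rw [wordA, if_pos hc]
      rcases hc with h | h <;> subst h <;> simp
    · rw [wordA, if_neg hc]
      have hne1 : c ≠ ' ' := fun h => hc (Or.inl h)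
      have hne2 : c ≠ '<' := fun h => hc (Or.inr h)
      simp [hne1, hne2, ih]

lemma tagA_eq : ∀ l : List Char, '>' ∈ l →
    tagA l = (l.takeWhile (fun a => a != '>') ++ ['>'], (l.dropWhile (fun a => a != '>')).tail) := by
  intro l; induction l with
  | nil => simp
  | cons c r ih =>
    intro hm
    by_cases hc : c = '>'
    · subst hc; simp [tagA]
    · have hm' : '>' ∈ r := Or.resolve_left (List.mem_cons.mp hm) (fun h => hc h.symm)
      have hb : (c != '>') = true := by simp [hc]
      rw [tagA, if_neg hc]
      simp only [ih hm']
      rw [List.takeWhile_cons_of_pos (by simp [hc]), List.dropWhile_cons_of_pos (by simp [hc])]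
      simp

lemma dropWhile_head_false {p : Char → Bool} : ∀ (l : List Char) (x : Char) (xs : List Char),
    l.dropWhile p = x :: xs → p x = false := by
  intro l; induction l with
  | nil => intro x xs h; simp at h
  | cons c r ih =>
    intro x xs h
    by_cases hc : p c
    · rw [List.dropWhile_cons_of_pos hc] at h; exact ih x xs h
    · rw [List.dropWhile_cons_of_neg hc] at h
      cases h; simpa using hc

lemma drop_gt (l : List Char) (h : '>' ∈ l) :
    ∃ t, l.dropWhile (fun a => a != '>') = '>' :: t := by
  cases hd : l.dropWhile (fun a => a != '>') with
  | nil =>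
    exfalso
    have htd := List.takeWhile_append_dropWhile (p := fun a => a != '>') (l := l)
    rw [hd] at htd; simp only [List.append_nil] at htd
    rw [← htd] at h
    have := List.mem_takeWhile_imp h
    simp at this
  | cons x t =>
    have hx := dropWhile_head_false l x t hd
    simp at hx
    subst hx
    exact ⟨t, rfl⟩

lemma preCheck_cons {c : Char} {r : List Char} (h : preCheck (c :: r) = true) : preCheck r = true := by
  simp [preCheck] at h; exact h.2

lemma preCheck_suffix : ∀ (t l : List Char), preCheck (t ++ l) = true → preCheck l = true := by
  intro t; induction t with
  | nil => simp
  | cons c r ih => intro l h; exact ih l (preCheck_cons h)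

lemma preCheck_of_suffix {l₁ l₂ : List Char} (h : l₂ <:+ l₁) (hp : preCheck l₁ = true) :
    preCheck l₂ = true := by
  obtain ⟨t, ht⟩ := h; exact preCheck_suffix t l₂ (ht ▸ hp)

-- processing one maximal tag-free run: A's char-by-char loop = split/reverse/join of the run
lemma runA : ∀ (n : Nat) (chunk : List Char), chunk.length ≤ n → ∀ rest : List Char,
    (∀ a ∈ chunk, a ≠ '<') → (rest = [] ∨ ∃ r', rest = '<' :: r') →
    goA (chunk ++ rest) = PySem.Chars.join [' '] ((sp chunk).map List.reverse) ++ goA rest := by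
  intro n
  induction n with
  | zero =>
    intro chunk hlen rest _ _
    have : chunk = [] := by cases chunk <;> simp_all
    subst this
    rw [show sp ([] : List Char) = [[]] from rfl]
    simp only [List.map_cons, List.map_nil, List.reverse_nil]
    rw [PySem.Chars.join_singleton]
    simp
  | succ n ih =>
    intro chunk hlen rest hnc hrest
    cases chunk with
    | nil =>
      rw [show sp ([] : List Char) = [[]] from rfl]
      simp only [List.map_cons, List.map_nil, List.reverse_nil]
      rw [PySem.Chars.join_singleton]
      simp
    | cons c cs =>
      have hc_ne : c ≠ '<' := hnc c (by simp)
      by_cases hsp_c : c = ' '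
      · -- space branch of A
        subst hsp_c
        rw [List.cons_append, goA, dif_neg (by decide), dif_pos rfl]
        rw [ih cs (by simp at hlen; omega) rest (fun a ha => hnc a (by simp [ha])) hrest]
        obtain ⟨t, ts, hts⟩ : ∃ t ts, sp cs = t :: ts := by
          cases hsp : sp cs with
          | nil => exact absurd hsp (sp_ne_nil cs)
          | cons t ts => exact ⟨t, ts, rfl⟩
        rw [show sp (' ' :: cs) = [] :: sp cs from by simp [sp]]
        rw [hts]
        simp only [List.map_cons, List.reverse_nil]
        rw [PySem.Chars.join_cons_cons]
        simp
      · -- word branch of A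
        rw [List.cons_append, goA, dif_neg hc_ne, dif_neg hsp_c]
        rw [show (c :: (cs ++ rest)) = ((c :: cs) ++ rest) from rfl]
        rw [wordA_spec]
        -- identify takeWhile/dropWhile of the q-predicate on (c::cs)++rest
        have hq_c : (!(c == ' ' || c == '<')) = true := by simp [hsp_c, hc_ne]
        have key : ∀ (xs : List Char), (∀ a ∈ xs, a ≠ '<') →
            (xs ++ rest).takeWhile (fun a => !(a == ' ' || a == '<')) = xs.takeWhile (fun a => a != ' ')
            ∧ (xs ++ rest).dropWhile (fun a => !(a == ' ' || a == '<')) = xs.dropWhile (fun a => a != ' ') ++ rest := by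
          intro xs
          induction xs with
          | nil =>
            intro _
            rcases hrest with h | ⟨r', h⟩ <;> subst h <;> simp
          | cons x xs ihx =>
            intro hx
            have hx_ne : x ≠ '<' := hx x (by simp)
            by_cases hxs : x = ' '
            · subst hxs; simp
            · have h1 : (!(x == ' ' || x == '<')) = true := by simp [hxs, hx_ne]
              have h2 : (x != ' ') = true := by simp [hxs]
              have hmem : ∀ a ∈ xs, a ≠ '<' := fun a ha => hx a (by simp [ha])
              constructor
              · rw [List.cons_append,
                  List.takeWhile_cons_of_pos (p := fun a => !(a == ' ' || a == '<')) h1,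
                  List.takeWhile_cons_of_pos (p := fun a => a != ' ') h2,
                  (ihx hmem).1]
              · rw [List.cons_append,
                  List.dropWhile_cons_of_pos (p := fun a => !(a == ' ' || a == '<')) h1,
                  List.dropWhile_cons_of_pos (p := fun a => a != ' ') h2,
                  (ihx hmem).2]
        obtain ⟨hTW, hDW⟩ := key (c :: cs) hnc
        rw [hTW, hDW]
        have htw_c : (c :: cs).takeWhile (fun a => a != ' ') = c :: cs.takeWhile (fun a => a != ' ') := by
          rw [List.takeWhile_cons_of_pos]; simp [hsp_c]
        have hdw_c : (c :: cs).dropWhile (fun a => a != ' ') = cs.dropWhile (fun a => a != ' ') := by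
          rw [List.dropWhile_cons_of_pos]; simp [hsp_c]
        rw [htw_c, hdw_c]
        rw [sp_head (c :: cs), htw_c]
        have hdw_suffix : cs.dropWhile (fun a => a != ' ') <:+ cs := List.dropWhile_suffix _
        cases hdw : cs.dropWhile (fun a => a != ' ') with
        | nil =>
          -- no space in cs: single token
          have htks : tks (c :: cs) = [] := by simp [tks, hdw_c, hdw]
          rw [htks]
          rw [show List.map List.reverse [c :: List.takeWhile (fun a => a != ' ') cs]
              = [(c :: List.takeWhile (fun a => a != ' ') cs).reverse] from rfl]
          rw [PySem.Chars.join_singleton]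
          simp
        | cons d dw' =>
          have hd_sp : d = ' ' := by
            have := dropWhile_head_false cs d dw' hdw; simpa using this
          subst hd_sp
          have htks : tks (c :: cs) = sp dw' := by simp [tks, hdw_c, hdw]
          rw [htks]
          -- goA (' ' :: dw' ++ rest)
          rw [List.cons_append, goA, dif_neg (by decide), dif_pos rfl]
          have hdw'_sub : dw' <:+ cs := by
            obtain ⟨t, ht⟩ := hdw_suffix
            exact ⟨t ++ [' '], by rw [← ht, hdw]; simp⟩
          have hdw'_len : dw'.length ≤ n := by
            have := hdw'_sub.length_le; simp at hlen; omega
          have hdw'_nc : ∀ a ∈ dw', a ≠ '<' := by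
            intro a ha
            exact hnc a (by simp [hdw'_sub.mem ha])
          rw [ih dw' hdw'_len rest hdw'_nc hrest]
          obtain ⟨t, ts, hts⟩ : ∃ t ts, sp dw' = t :: ts := by
            cases hsp : sp dw' with
            | nil => exact absurd hsp (sp_ne_nil dw')
            | cons t ts => exact ⟨t, ts, rfl⟩
          rw [hts]
          simp only [List.map_cons]
          rw [PySem.Chars.join_cons_cons]
          simp

lemma mainEq : ∀ (n : Nat) (l : List Char), l.length ≤ n → preCheck l = true → goA l = goB l := by
  intro n
  induction n with
  | zero =>
    intro l hlen _
    have : l = [] := by cases l <;> simp_all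
    subst this; simp [goA, goB]
  | succ n ih =>
    intro l hlen hpre
    cases l with
    | nil => simp [goA, goB]
    | cons c r =>
      by_cases hc : c = '<'
      · -- tag case
        subst hc
        have hgt : '>' ∈ r := by
          simp [preCheck] at hpre
          have := hpre.1; simpa [List.contains_iff_mem] using this
        have hgt' : '>' ∈ '<' :: r := by simp [hgt]
        obtain ⟨t, hdrop⟩ := drop_gt ('<' :: r) hgt'
        rw [goA, dif_pos rfl, tagA_eq _ hgt', hdrop]
        rw [goB, dif_pos rfl, hdrop]
        simp only [List.tail_cons]
        have hdw_cons : ('<' :: r).dropWhile (fun a => a != '>') = r.dropWhile (fun a => a != '>') := by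
          rw [List.dropWhile_cons_of_pos]; simp
        have ht_len : t.length ≤ n := by
          have := List.length_dropWhile_le (fun a => a != '>') r
          rw [hdw_cons] at hdrop
          simp at hlen
          have : (r.dropWhile (fun a => a != '>')).length = t.length + 1 := by rw [hdrop]; simp
          omega
        have ht_sfx : t <:+ ('<' :: r) := by
          have h1 : t <:+ ('<' :: r).dropWhile (fun a => a != '>') := by
            rw [hdrop]; exact ⟨['>'], rfl⟩
          exact h1.trans (List.dropWhile_suffix _)
        rw [ih t ht_len (preCheck_of_suffix ht_sfx hpre)]
        simp
      · -- run case
        have hsplit := List.takeWhile_append_dropWhile (p := fun a => a != '<') (l := c :: r)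
        have hnc : ∀ a ∈ (c :: r).takeWhile (fun a => a != '<'), a ≠ '<' := by
          intro a ha; have := List.mem_takeWhile_imp ha; simpa using this
        have hrest : (c :: r).dropWhile (fun a => a != '<') = []
            ∨ ∃ r', (c :: r).dropWhile (fun a => a != '<') = '<' :: r' := by
          cases hd : (c :: r).dropWhile (fun a => a != '<') with
          | nil => exact Or.inl rfl
          | cons x xs =>
            have := dropWhile_head_false _ x xs hd
            simp at this
            exact Or.inr ⟨xs, by rw [this]⟩
        have hA : goA (c :: r)
            = PySem.Chars.join [' '] ((sp ((c :: r).takeWhile (fun a => a != '<'))).map List.reverse)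
              ++ goA ((c :: r).dropWhile (fun a => a != '<')) := by
          conv_lhs => rw [← hsplit]
          exact runA (c :: r).length _ (List.Sublist.length_le (List.takeWhile_sublist _)) _ hnc hrest
        rw [hA]
        rw [goB, dif_neg hc]
        rw [revTokens, splitOn_space]
        congr 1
        have hdw_sfx : (c :: r).dropWhile (fun a => a != '<') <:+ (c :: r) := List.dropWhile_suffix _
        have hdw_cons : (c :: r).dropWhile (fun a => a != '<') = r.dropWhile (fun a => a != '<') := by
          rw [List.dropWhile_cons_of_pos]; simp [hc]
        have hlen' : ((c :: r).dropWhile (fun a => a != '<')).length ≤ n := by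
          rw [hdw_cons]
          have := List.length_dropWhile_le (fun a => a != '<') r
          simp at hlen; omega
        exact ih _ hlen' (preCheck_of_suffix hdw_sfx hpre)

-- ===== VERDICT (by name: the statement is the Claim_ definition above) =====
theorem solution_spec : Claim_equal_solution := by
  intro s _ hpre
  unfold Spec_solution solution solution_alt
  rw [mainEq s.toList.length s.toList le_rfl hpre]
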